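-- pv_equiv track=rewrite | github.com/ImangulovA/ProjectEuler | 230.py | fiboword
-- ===== SOURCE A (Python) =====
-- def fiboword(a,b,n):
--     lena = len(a)
--     lenb = len(b)
--     digits = [lena, lenb]
--     digit_range = True
--     while digit_range:
--         digits.append(digits[-1] + digits[-2])
--         if digits[-1] >= n:
--             digit_range = False
--
--     while len(digits) > 3:
--         if n <= digits[-3]:
--             digits.pop()
--             digits.pop()
--         else:
--             n = n-digits[-3]
--             digits.pop()
--
--     if len(digits) == 3:
--         if n <= digits[-3]:
--             return(a[n-1])
--         else:
--             n = n-digits[-3]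
--             return(b[n-1])
--     else:
--         return(b[n-1])
-- ===== SOURCE B (Python) =====
-- def fiboword(a, b, n):
--     L = [len(a), len(b)]
--     while True:
--         L.append(L[-1] + L[-2])
--         if L[-1] >= n:
--             break
--
--     def idx(k, n):
--         if k == 0:
--             return a[n - 1]
--         if k == 1:
--             return b[n - 1]
--         if n <= L[k - 2]:
--             return idx(k - 2, n)
--         return idx(k - 1, n - L[k - 2])
--
--     return idx(len(L) - 1, n)
-- ===== Notes on version B (the rewrite author's own statement) =====
-- stated objective: alternative
-- what changed: A's pop-based in-place fold over the Fibonacci length list is replaced by a top-down recursive descent idx(k,n) that indexes the same list, descending S_k = S_{k-2}++S_{k-1} without mutating it.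
import Mathlib
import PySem

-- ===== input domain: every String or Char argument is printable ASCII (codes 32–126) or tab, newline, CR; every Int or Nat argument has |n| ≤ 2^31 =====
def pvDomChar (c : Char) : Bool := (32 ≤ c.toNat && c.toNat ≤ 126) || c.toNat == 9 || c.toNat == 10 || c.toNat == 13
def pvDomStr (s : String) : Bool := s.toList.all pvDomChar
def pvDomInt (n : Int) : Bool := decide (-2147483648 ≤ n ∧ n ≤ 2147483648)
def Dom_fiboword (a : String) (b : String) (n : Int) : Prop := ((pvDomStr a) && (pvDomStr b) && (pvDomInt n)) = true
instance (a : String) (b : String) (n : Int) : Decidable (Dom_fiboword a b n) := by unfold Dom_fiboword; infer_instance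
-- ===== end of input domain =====

-- B replaces A's pop-based fold over the Fibonacci length list by a top-down recursive
-- descent indexing into the same list (alternative decomposition; same cost).

-- s[i] as a one-character string (exact: PySem.Str.pyGet? is Python indexing incl. negatives)
def pvCharAt (s : String) (i : Int) : String :=
  match PySem.Str.pyGet? s i with
  | some c => String.ofList [c]
  | none => ""

-- ===== PORT A =====
-- the do-while append loop (fuel-guarded; fuel only makes the loop total, 2^40 is never
-- exhausted on inputs admitted by Dom_ ∧ Pre_)
def fibowordBuild (fuel : Nat) (digits : List Int) (n : Int) : List Int :=
  match fuel with
  | 0 => digits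
  | f + 1 =>
    let d := digits ++ [PySem.List.pyGetD digits (-1) 0 + PySem.List.pyGetD digits (-2) 0]
    if n ≤ PySem.List.pyGetD d (-1) 0 then d else fibowordBuild f d n

-- `while len(digits) > 3:` pop loop; returns (digits, n) at exit
def fibowordReduce (digits : List Int) (n : Int) : List Int × Int :=
  if digits.length > 3 then
    if n ≤ PySem.List.pyGetD digits (-3) 0 then
      fibowordReduce digits.dropLast.dropLast n
    else
      fibowordReduce digits.dropLast (n - PySem.List.pyGetD digits (-3) 0)
  else (digits, n)
termination_by digits.length
decreasing_by
  · simp only [List.length_dropLast]; omega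
  · simp only [List.length_dropLast]; omega

-- everything after the building loop
def fibowordTail (a : String) (b : String) (digits0 : List Int) (n0 : Int) : String :=
  let r := fibowordReduce digits0 n0
  let digits := r.1
  let n := r.2
  if digits.length == 3 then
    if n ≤ PySem.List.pyGetD digits (-3) 0 then pvCharAt a (n - 1)
    else pvCharAt b (n - PySem.List.pyGetD digits (-3) 0 - 1)
  else pvCharAt b (n - 1)

def fiboword (a : String) (b : String) (n : Int) : String :=
  let lena := PySem.Str.len a
  let lenb := PySem.Str.len b
  fibowordTail a b (fibowordBuild (2 ^ 40) [lena, lenb] n) n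

-- ===== PORT B =====
-- B builds the same length list L (same fuel guard), then descends it top-down
def fibowordBuildAlt (fuel : Nat) (L : List Int) (n : Int) : List Int :=
  match fuel with
  | 0 => L
  | f + 1 =>
    let d := L ++ [PySem.List.pyGetD L (-1) 0 + PySem.List.pyGetD L (-2) 0]
    if n ≤ PySem.List.pyGetD d (-1) 0 then d else fibowordBuildAlt f d n

-- idx(k, n): recursive descent of S_k = S_{k-2} ++ S_{k-1}
def fibowordIdx (a : String) (b : String) (L : List Int) (k : Nat) (n : Int) : String :=
  match k with
  | 0 => pvCharAt a (n - 1)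
  | 1 => pvCharAt b (n - 1)
  | k' + 2 =>
    let m := PySem.List.pyGetD L (k' : Int) 0
    if n ≤ m then fibowordIdx a b L k' n
    else fibowordIdx a b L (k' + 1) (n - m)

def fiboword_alt (a : String) (b : String) (n : Int) : String :=
  let L := fibowordBuildAlt (2 ^ 40) [PySem.Str.len a, PySem.Str.len b] n
  fibowordIdx a b L (L.length - 1) n

-- ===== PRECONDITION & SPEC =====
-- Pre_ excludes exactly the inputs on which Python A does not return: a = b = "" with
-- n ≥ 1 loops forever, and a = b = "" with n ≤ 0, or n ≤ 0 below the negative-wrap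
-- range of a, raise IndexError. (For 1-len(a) ≤ n ≤ 0 A returns a[n-1] by Python's
-- negative-index wrap, and B agrees there, so those stay inside Pre_.)
def Pre_fiboword (a : String) (b : String) (n : Int) : Prop :=
  (a ≠ "" ∨ b ≠ "") ∧ (1 ≤ n ∨ (a ≠ "" ∧ 1 - PySem.Str.len a ≤ n))

instance (a : String) (b : String) (n : Int) : Decidable (Pre_fiboword a b n) := by
  unfold Pre_fiboword; infer_instance

def pvWitness_fiboword : String × String × Int := ("ab", "c", 3)

def Spec_fiboword (a : String) (b : String) (n : Int) (out : String) : Prop := out = fiboword_alt a b n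
instance (a : String) (b : String) (n : Int) (out : String) : Decidable (Spec_fiboword a b n out) := by unfold Spec_fiboword; infer_instance

-- ===== CLAIM (what is proved, stated in full; the proofs are below) =====
def Claim_equal_fiboword : Prop := ∀ (a : String) (b : String) (n : Int), Dom_fiboword a b n → Pre_fiboword a b n → Spec_fiboword a b n (fiboword a b n)

-- ===== LEMMAS AND PROOFS =====

-- the two build loops are the same loop
lemma buildAlt_eq_build : ∀ (f : Nat) (d : List Int) (n : Int),
    fibowordBuildAlt f d n = fibowordBuild f d n := by
  intro f
  induction f with
  | zero => intro d n; rfl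
  | succ f ih => intro d n; simp only [fibowordBuildAlt, fibowordBuild]; split <;> simp [ih]

lemma build_len_ge : ∀ (f : Nat) (d : List Int) (n : Int),
    d.length ≤ (fibowordBuild f d n).length := by
  intro f
  induction f with
  | zero => intro d n; exact le_refl _
  | succ f ih =>
    intro d n
    simp only [fibowordBuild]
    split
    · simp
    · calc d.length ≤ (d ++ [PySem.List.pyGetD d (-1) 0 + PySem.List.pyGetD d (-2) 0]).length := by
            simp
        _ ≤ _ := ih _ n

lemma reduce_small (digits : List Int) (n : Int) (h : ¬ digits.length > 3) :
    fibowordReduce digits n = (digits, n) := by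
  rw [fibowordReduce, if_neg h]

lemma tail_congr (a b : String) (d1 d2 : List Int) (n1 n2 : Int)
    (h : fibowordReduce d1 n1 = fibowordReduce d2 n2) :
    fibowordTail a b d1 n1 = fibowordTail a b d2 n2 := by
  rw [fibowordTail, fibowordTail, h]

lemma take_dropLast (L : List Int) (m : Nat) (h : m ≤ L.length) :
    (L.take m).dropLast = L.take (m - 1) := by
  rw [List.dropLast_eq_take, List.take_take]
  congr 1
  simp only [List.length_take]
  omega

lemma pyGetD_take_neg3 (L : List Int) (k : Nat) (h2 : 2 ≤ k) (h : k + 1 ≤ L.length) :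
    PySem.List.pyGetD (L.take (k + 1)) (-3) 0 = PySem.List.pyGetD L ((k - 2 : Nat) : Int) 0 := by
  rw [PySem.List.pyGetD_neg_ofNat (L.take (k + 1)) 3 0 (by omega) (by simp; omega)]
  rw [PySem.List.pyGetD_natCast, List.getD_eq_getElem _ _ (by omega)]
  have hlen : (L.take (k + 1)).length = k + 1 := by simp; omega
  simp only [hlen]
  rw [List.getElem_take]
  congr 1

lemma idx_step (a b : String) (L : List Int) (k : Nat) (n : Int) :
    fibowordIdx a b L (k + 2) n
      = if n ≤ PySem.List.pyGetD L (k : Int) 0 then fibowordIdx a b L k n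
        else fibowordIdx a b L (k + 1) (n - PySem.List.pyGetD L (k : Int) 0) := rfl

-- A's tail (pop loop + final branch) on the first k+1 lengths equals B's descent from k
lemma tail_eq_idx (a b : String) : ∀ (k : Nat) (L : List Int) (n : Int), 1 ≤ k →
    k + 1 ≤ L.length → fibowordTail a b (L.take (k + 1)) n = fibowordIdx a b L k n := by
  intro k
  induction k using Nat.strong_induction_on with
  | _ k ih =>
    intro L n hk hlen
    have hlt : (L.take (k + 1)).length = k + 1 := by simp; omega
    match k, hk, hlen, hlt with
    | 1, _, hlen, hlt =>
      rw [fibowordTail, reduce_small _ _ (by rw [hlt]; omega)]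
      simp only [hlt]
      norm_num [fibowordIdx]
    | 2, _, hlen, hlt =>
      rw [fibowordTail, reduce_small _ _ (by rw [hlt]; omega)]
      simp only [hlt]
      rw [pyGetD_take_neg3 L 2 (by omega) hlen]
      norm_num [fibowordIdx]
    | (k' + 3), _, hlen, hlt =>
      have hc := pyGetD_take_neg3 L (k' + 3) (by omega) hlen
      have hn3 : (k' + 3) - 2 = k' + 1 := by omega
      rw [hn3] at hc
      by_cases hn : n ≤ PySem.List.pyGetD L ((k' + 1 : Nat) : Int) 0
      · have hred : fibowordReduce (L.take (k' + 3 + 1)) n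
            = fibowordReduce (L.take (k' + 1 + 1)) n := by
          rw [fibowordReduce, if_pos (by rw [hlt]; omega), hc, if_pos hn,
            take_dropLast L (k' + 3 + 1) (by omega)]
          simp only [Nat.add_sub_cancel]
          rw [take_dropLast L (k' + 3) (by omega)]
          simp only [show k' + 3 - 1 = k' + 1 + 1 from by omega]
        rw [tail_congr a b _ _ _ _ hred, ih (k' + 1) (by omega) L n (by omega) (by omega),
          show k' + 3 = (k' + 1) + 2 from rfl, idx_step, if_pos hn]
      · have hred : fibowordReduce (L.take (k' + 3 + 1)) n
            = fibowordReduce (L.take (k' + 2 + 1)) (n - PySem.List.pyGetD L ((k' + 1 : Nat) : Int) 0) := by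
          rw [fibowordReduce, if_pos (by rw [hlt]; omega), hc, if_neg hn,
            take_dropLast L (k' + 3 + 1) (by omega)]
          simp only [Nat.add_sub_cancel]
        rw [tail_congr a b _ _ _ _ hred, ih (k' + 2) (by omega) L _ (by omega) (by omega),
          show k' + 3 = (k' + 1) + 2 from rfl]
        conv_rhs => rw [idx_step]
        rw [if_neg hn]

-- ===== VERDICT (by name: the statement is the Claim_ definition above) =====
theorem fiboword_spec : Claim_equal_fiboword := by
  unfold Claim_equal_fiboword
  intro a b n _ _
  show fiboword a b n = fiboword_alt a b n
  have h2 : 2 ≤ (fibowordBuild (2 ^ 40) [PySem.Str.len a, PySem.Str.len b] n).length := by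
    simpa using build_len_ge (2 ^ 40) [PySem.Str.len a, PySem.Str.len b] n
  have h := tail_eq_idx a b
      ((fibowordBuild (2 ^ 40) [PySem.Str.len a, PySem.Str.len b] n).length - 1)
      (fibowordBuild (2 ^ 40) [PySem.Str.len a, PySem.Str.len b] n) n (by omega) (by omega)
  rw [show (fibowordBuild (2 ^ 40) [PySem.Str.len a, PySem.Str.len b] n).length - 1 + 1
      = (fibowordBuild (2 ^ 40) [PySem.Str.len a, PySem.Str.len b] n).length from by omega,
    List.take_length] at h
  simpa only [fiboword, fiboword_alt, buildAlt_eq_build] using h
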